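-- pv_equiv track=rewrite | github.com/elanmurugan2004/NeuroAI-ADHD | backend/app/routes/assessment_routes.py | _match_region_to_atlas_value
-- ===== SOURCE A (Python) =====
-- from typing import Optional
--
-- def _match_region_to_atlas_value(region_name: str, atlas_labels) -> Optional[int]:
--     target = str(region_name).strip().lower()
--     if not target:
--         return None
--
--     # exact match
--     for idx, atlas_name in enumerate(atlas_labels):
--         atlas_name = str(atlas_name).strip()
--         atlas_lower = atlas_name.lower()
--
--         if idx == 0:
--             continue
--         if not atlas_name or atlas_lower in {"background", "unknown", "nan"}:
--             continue
--
--         if atlas_lower == target: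
--             return idx
--
--     # partial match
--     for idx, atlas_name in enumerate(atlas_labels):
--         atlas_name = str(atlas_name).strip()
--         atlas_lower = atlas_name.lower()
--
--         if idx == 0:
--             continue
--         if not atlas_name or atlas_lower in {"background", "unknown", "nan"}:
--             continue
--
--         if target in atlas_lower or atlas_lower in target:
--             return idx
--
--     return None
-- ===== SOURCE B (Python) =====
-- from typing import Optional
--
-- _SKIP = {"background", "unknown", "nan"}
--
-- def _match_region_to_atlas_value(region_name: str, atlas_labels) -> Optional[int]:
--     target = str(region_name).strip().lower()
--     if not target:
--         return None
--     partial_idx = None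
--     for idx, atlas_name in enumerate(atlas_labels):
--         if idx == 0:
--             continue
--         atlas_lower = str(atlas_name).strip().lower()
--         if not atlas_lower or atlas_lower in _SKIP:
--             continue
--         if atlas_lower == target:
--             return idx
--         if partial_idx is None and (target in atlas_lower or atlas_lower in target):
--             partial_idx = idx
--     return partial_idx
-- ===== Notes on version B (the rewrite author's own statement) =====
-- stated objective: alternative
-- what changed: Replaced A's two full passes over atlas_labels (exact-match scan, then a second partial-match scan) by a single pass that returns an exact match immediately and latches the first partial candidate to return after the loop.
import Mathlib
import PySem

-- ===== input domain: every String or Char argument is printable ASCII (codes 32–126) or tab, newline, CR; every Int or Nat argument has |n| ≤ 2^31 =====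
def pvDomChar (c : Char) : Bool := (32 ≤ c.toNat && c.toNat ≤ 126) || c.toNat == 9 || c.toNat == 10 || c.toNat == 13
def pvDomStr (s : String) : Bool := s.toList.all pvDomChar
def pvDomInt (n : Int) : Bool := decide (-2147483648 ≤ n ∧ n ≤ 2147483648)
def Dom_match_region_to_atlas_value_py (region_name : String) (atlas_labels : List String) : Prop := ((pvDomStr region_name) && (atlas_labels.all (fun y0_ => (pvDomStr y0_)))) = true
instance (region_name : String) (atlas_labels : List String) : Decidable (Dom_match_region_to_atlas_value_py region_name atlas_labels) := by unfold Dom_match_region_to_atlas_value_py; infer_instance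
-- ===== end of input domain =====

-- ===== PORT A =====
-- B does one pass where A does two; this one honest line: single-pass latch vs two scans (objective: alternative).
-- names skipped by both programs: {"background", "unknown", "nan"}
def pvSkipSet : List (List Char) := ["background".toList, "unknown".toList, "nan".toList]

-- A's first loop: exact match scan
def pvExactScan (target : List Char) : List (Int × String) → Option Int
  | [] => none
  | (idx, atlasName) :: rest =>
    let s := PySem.Chars.strip atlasName.toList
    let l := PySem.Chars.lower s
    if idx = 0 then pvExactScan target rest
    else if s = [] ∨ l ∈ pvSkipSet then pvExactScan target rest
    else if l = target then some idx
    else pvExactScan target rest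

-- A's second loop: partial match scan
def pvPartialScan (target : List Char) : List (Int × String) → Option Int
  | [] => none
  | (idx, atlasName) :: rest =>
    let s := PySem.Chars.strip atlasName.toList
    let l := PySem.Chars.lower s
    if idx = 0 then pvPartialScan target rest
    else if s = [] ∨ l ∈ pvSkipSet then pvPartialScan target rest
    else if PySem.Chars.isIn target l || PySem.Chars.isIn l target then some idx
    else pvPartialScan target rest

def match_region_to_atlas_value_py (region_name : String) (atlas_labels : List String) : Option Int :=
  let target := PySem.Chars.lower (PySem.Chars.strip region_name.toList)
  if target = [] then none
  else
    match pvExactScan target (PySem.List.enumerate atlas_labels) with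
    | some i => some i
    | none => pvPartialScan target (PySem.List.enumerate atlas_labels)

-- ===== PORT B =====
-- B's single loop: return on exact match, latch the first partial candidate
def pvScanB (target : List Char) (partialIdx : Option Int) : List (Int × String) → Option Int
  | [] => partialIdx
  | (idx, atlasName) :: rest =>
    if idx = 0 then pvScanB target partialIdx rest
    else
      let l := PySem.Chars.lower (PySem.Chars.strip atlasName.toList)
      if l = [] ∨ l ∈ pvSkipSet then pvScanB target partialIdx rest
      else if l = target then some idx
      else if partialIdx = none ∧ (PySem.Chars.isIn target l || PySem.Chars.isIn l target) then
        pvScanB target (some idx) rest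
      else pvScanB target partialIdx rest

def match_region_to_atlas_value_py_alt (region_name : String) (atlas_labels : List String) : Option Int :=
  let target := PySem.Chars.lower (PySem.Chars.strip region_name.toList)
  if target = [] then none
  else pvScanB target none (PySem.List.enumerate atlas_labels)

-- ===== PRECONDITION & SPEC =====
def Spec_match_region_to_atlas_value_py (region_name : String) (atlas_labels : List String) (out : Option Int) : Prop := out = match_region_to_atlas_value_py_alt region_name atlas_labels
instance (region_name : String) (atlas_labels : List String) (out : Option Int) : Decidable (Spec_match_region_to_atlas_value_py region_name atlas_labels out) := by unfold Spec_match_region_to_atlas_value_py; infer_instance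

-- ===== CLAIM (what is proved, stated in full; the proofs are below) =====
def Claim_equal_match_region_to_atlas_value_py : Prop := ∀ (region_name : String) (atlas_labels : List String), Dom_match_region_to_atlas_value_py region_name atlas_labels → Spec_match_region_to_atlas_value_py region_name atlas_labels (match_region_to_atlas_value_py region_name atlas_labels)

-- ===== LEMMAS AND PROOFS =====

lemma pvLower_nil_iff (s : List Char) : PySem.Chars.lower s = [] ↔ s = [] := by
  simp [PySem.Chars.lower]

lemma pvScanB_eq (target : List Char) (xs : List (Int × String)) (acc : Option Int) :
    pvScanB target acc xs =
      match pvExactScan target xs with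
      | some i => some i
      | none => match acc with
        | some j => some j
        | none => pvPartialScan target xs := by
  induction xs generalizing acc with
  | nil => cases acc <;> rfl
  | cons x rest ih =>
    obtain ⟨idx, name⟩ := x
    simp only [pvScanB, pvExactScan, pvPartialScan]
    by_cases h0 : idx = 0
    · simp only [if_pos h0, ih]
    · simp only [if_neg h0]
      by_cases hbad : PySem.Chars.strip name.toList = [] ∨
          PySem.Chars.lower (PySem.Chars.strip name.toList) ∈ pvSkipSet
      · have hbad' : PySem.Chars.lower (PySem.Chars.strip name.toList) = [] ∨
            PySem.Chars.lower (PySem.Chars.strip name.toList) ∈ pvSkipSet := by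
          rcases hbad with h | h
          · exact Or.inl ((pvLower_nil_iff _).mpr h)
          · exact Or.inr h
        simp only [if_pos hbad, if_pos hbad', ih]
      · have hbad' : ¬ (PySem.Chars.lower (PySem.Chars.strip name.toList) = [] ∨
            PySem.Chars.lower (PySem.Chars.strip name.toList) ∈ pvSkipSet) := by
          intro h
          rcases h with h | h
          · exact hbad (Or.inl ((pvLower_nil_iff _).mp h))
          · exact hbad (Or.inr h)
        simp only [if_neg hbad, if_neg hbad']
        by_cases hex : PySem.Chars.lower (PySem.Chars.strip name.toList) = target
        · simp only [if_pos hex]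
        · simp only [if_neg hex]
          by_cases hp : (PySem.Chars.isIn target (PySem.Chars.lower (PySem.Chars.strip name.toList)) ||
              PySem.Chars.isIn (PySem.Chars.lower (PySem.Chars.strip name.toList)) target) = true
          · cases acc with
            | none =>
              rw [if_pos ⟨rfl, hp⟩, ih, if_pos hp]
            | some j =>
              rw [if_neg (by simp), ih]
          · have hcond : ¬ (acc = none ∧ (PySem.Chars.isIn target (PySem.Chars.lower (PySem.Chars.strip name.toList)) ||
                PySem.Chars.isIn (PySem.Chars.lower (PySem.Chars.strip name.toList)) target) = true) := by
              intro h; exact hp h.2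
            rw [if_neg hcond, ih, if_neg hp]

-- ===== VERDICT (by name: the statement is the Claim_ definition above) =====
theorem match_region_to_atlas_value_py_spec : Claim_equal_match_region_to_atlas_value_py := by
  intro region_name atlas_labels _
  unfold Spec_match_region_to_atlas_value_py match_region_to_atlas_value_py match_region_to_atlas_value_py_alt
  by_cases h : PySem.Chars.lower (PySem.Chars.strip region_name.toList) = []
  · simp only [if_pos h]
  · simp only [if_neg h]
    rw [pvScanB_eq]
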